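-- pv_equiv track=rewrite | github.com/bryceag11/triangulang | triangulang/utils/spatial_reasoning.py | parse_spatial_qualifier
-- ===== SOURCE A (Python) =====
-- from typing import Tuple, Optional, List, Dict, Any
--
-- SPATIAL_QUALIFIERS = {
--     # Depth-based (extremes)
--     'nearest': 'depth_min', 'closest': 'depth_min', 'close': 'depth_min',
--     'farthest': 'depth_max', 'far': 'depth_max', 'distant': 'depth_max',
--     # Depth-based (ordinal)
--     'second nearest': 'depth_2nd_min', 'second closest': 'depth_2nd_min',
--     'second farthest': 'depth_2nd_max',
--     # Horizontal position (extremes)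
--     'leftmost': 'x_min', 'left': 'x_min',
--     'rightmost': 'x_max', 'right': 'x_max',
--     # Horizontal position (ordinal)
--     'second leftmost': 'x_2nd_min', 'second from left': 'x_2nd_min',
--     'second rightmost': 'x_2nd_max', 'second from right': 'x_2nd_max',
--     # Vertical position (extremes)
--     'topmost': 'y_min', 'top': 'y_min', 'upper': 'y_min',
--     'bottommost': 'y_max', 'bottom': 'y_max', 'lower': 'y_max',
--     # Vertical position (ordinal)
--     'second topmost': 'y_2nd_min', 'second from top': 'y_2nd_min',
--     'second bottommost': 'y_2nd_max', 'second from bottom': 'y_2nd_max',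
--     # Middle/center position (for objects not at extremes)
--     'middle': 'middle', 'central': 'middle', 'center': 'middle',
--     'mid-depth': 'depth_mid', 'middle depth': 'depth_mid',
--     # Size-based (using mask coverage)
--     'largest': 'size_max', 'biggest': 'size_max', 'big': 'size_max',
--     'smallest': 'size_min', 'small': 'size_min', 'tiny': 'size_min',
-- }
--
-- def parse_spatial_qualifier(prompt: str) -> Tuple[Optional[str], str]:
--     """Extract spatial qualifier and base object from prompt.
--
--     Only matches qualifiers as leading words (possibly after an article).
--     This avoids false matches on relational queries like "chair to the right of table"
--     where "right" is NOT a spatial qualifier prefix.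
--
--     Args:
--         prompt: e.g., "nearest chair", "the rightmost monitor"
--
--     Returns:
--         (qualifier_type, base_object): e.g., ('depth_min', 'chair')
--         qualifier_type is one of: 'depth_min', 'depth_max', 'x_min', 'x_max', 'y_min', 'y_max', None
--     """
--     prompt_lower = prompt.lower().strip()
--
--     # Strip leading article
--     stripped = prompt_lower
--     for prefix in ['the ', 'a ', 'an ']:
--         if stripped.startswith(prefix):
--             stripped = stripped[len(prefix):]
--             break
--
--     # Check if prompt starts with a spatial qualifier word
--     # Sort by length descending so "second nearest" matches before "nearest", etc.
--     for word, qualifier_type in sorted(SPATIAL_QUALIFIERS.items(), key=lambda x: len(x[0]), reverse=True):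
--         if stripped.startswith(word + ' ') or stripped == word:
--             base = stripped[len(word):].strip()
--             return qualifier_type, base
--
--     return None, prompt
-- ===== SOURCE B (Python) =====
-- from typing import Tuple, Optional
--
-- # The qualifier table, maintained grouped by qualifier type; the phrase->type
-- # lookup dict is derived from it once at module load.
-- QUALIFIER_PHRASES = [
--     ('depth_min', ['nearest', 'closest', 'close']),
--     ('depth_max', ['farthest', 'far', 'distant']),
--     ('depth_2nd_min', ['second nearest', 'second closest']),
--     ('depth_2nd_max', ['second farthest']),
--     ('x_min', ['leftmost', 'left']),
--     ('x_max', ['rightmost', 'right']),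
--     ('x_2nd_min', ['second leftmost', 'second from left']),
--     ('x_2nd_max', ['second rightmost', 'second from right']),
--     ('y_min', ['topmost', 'top', 'upper']),
--     ('y_max', ['bottommost', 'bottom', 'lower']),
--     ('y_2nd_min', ['second topmost', 'second from top']),
--     ('y_2nd_max', ['second bottommost', 'second from bottom']),
--     ('middle', ['middle', 'central', 'center']),
--     ('depth_mid', ['mid-depth', 'middle depth']),
--     ('size_max', ['largest', 'biggest', 'big']),
--     ('size_min', ['smallest', 'small', 'tiny']),
-- ]
-- PHRASE_TO_TYPE = {p: t for t, ps in QUALIFIER_PHRASES for p in ps}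
--
-- def parse_spatial_qualifier(prompt: str) -> Tuple[Optional[str], str]:
--     """Single forward scan over the prompt's word boundaries, keeping the last
--     (= longest) boundary whose prefix is a known qualifier phrase, instead of
--     scanning the whole length-sorted phrase table with startswith."""
--     stripped = prompt.lower().strip()
--     article = next((a for a in ('the ', 'a ', 'an ') if stripped.startswith(a)), '')
--     stripped = stripped[len(article):]
--     qt, cut = None, 0
--     for pos in range(len(stripped) + 1):
--         if pos == len(stripped) or stripped[pos] == ' ':
--             hit = PHRASE_TO_TYPE.get(stripped[:pos])
--             if hit is not None:
--                 qt, cut = hit, pos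
--     if qt is None:
--         return None, prompt
--     return qt, stripped[cut:].strip()
-- ===== Notes on version B (the rewrite author's own statement) =====
-- stated objective: alternative
-- what changed: A sorts the 38-entry qualifier table by length and scans it testing startswith on every entry; B instead makes one forward pass over the word boundaries of the article-stripped prompt (each space and the end), looking each boundary prefix up in a dict derived from a type-grouped phrase table and keeping the last (= longest) hit.
import Mathlib
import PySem

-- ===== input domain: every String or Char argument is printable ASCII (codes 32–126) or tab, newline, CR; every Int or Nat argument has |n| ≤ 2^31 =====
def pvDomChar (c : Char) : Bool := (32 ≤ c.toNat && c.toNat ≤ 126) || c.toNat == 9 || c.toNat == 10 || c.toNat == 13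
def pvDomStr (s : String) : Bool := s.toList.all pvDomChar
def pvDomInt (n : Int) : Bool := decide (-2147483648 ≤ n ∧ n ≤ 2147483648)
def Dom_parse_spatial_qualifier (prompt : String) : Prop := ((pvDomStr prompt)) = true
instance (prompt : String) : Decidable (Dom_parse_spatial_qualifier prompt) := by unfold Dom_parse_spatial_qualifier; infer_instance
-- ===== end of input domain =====

-- B replaces A's scan of the length-sorted qualifier table (startswith against
-- every entry) by one forward pass over the prompt's word boundaries, looking
-- each boundary prefix up in a dict derived from a type-grouped phrase table
-- and keeping the last (= longest) hit (objective: alternative algorithm, same result).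
-- Strings are handled as their List Char code points via PySem.Chars/List (exact).

-- ===== PORT A =====
-- the module constant SPATIAL_QUALIFIERS of Source A (a dict; keys as List Char)
def pvQualPairs : List (List Char × String) := [
  ("nearest".toList, "depth_min"), ("closest".toList, "depth_min"), ("close".toList, "depth_min"),
  ("farthest".toList, "depth_max"), ("far".toList, "depth_max"), ("distant".toList, "depth_max"),
  ("second nearest".toList, "depth_2nd_min"), ("second closest".toList, "depth_2nd_min"),
  ("second farthest".toList, "depth_2nd_max"),
  ("leftmost".toList, "x_min"), ("left".toList, "x_min"),
  ("rightmost".toList, "x_max"), ("right".toList, "x_max"),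
  ("second leftmost".toList, "x_2nd_min"), ("second from left".toList, "x_2nd_min"),
  ("second rightmost".toList, "x_2nd_max"), ("second from right".toList, "x_2nd_max"),
  ("topmost".toList, "y_min"), ("top".toList, "y_min"), ("upper".toList, "y_min"),
  ("bottommost".toList, "y_max"), ("bottom".toList, "y_max"), ("lower".toList, "y_max"),
  ("second topmost".toList, "y_2nd_min"), ("second from top".toList, "y_2nd_min"),
  ("second bottommost".toList, "y_2nd_max"), ("second from bottom".toList, "y_2nd_max"),
  ("middle".toList, "middle"), ("central".toList, "middle"), ("center".toList, "middle"),
  ("mid-depth".toList, "depth_mid"), ("middle depth".toList, "depth_mid"),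
  ("largest".toList, "size_max"), ("biggest".toList, "size_max"), ("big".toList, "size_max"),
  ("smallest".toList, "size_min"), ("small".toList, "size_min"), ("tiny".toList, "size_min")]

def SPATIAL_QUALIFIERS : PySem.Dict (List Char) String := PySem.Dict.mk pvQualPairs

-- A's `for prefix in ['the ', 'a ', 'an ']: … break` over prompt_lower
def pvStripArticle (prompt_lower : List Char) : List Char :=
  if PySem.Chars.startswith prompt_lower "the ".toList then PySem.List.slice prompt_lower (some 4) none
  else if PySem.Chars.startswith prompt_lower "a ".toList then PySem.List.slice prompt_lower (some 2) none
  else if PySem.Chars.startswith prompt_lower "an ".toList then PySem.List.slice prompt_lower (some 3) none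
  else prompt_lower

-- A's prompt.lower().strip() then the article loop
def pvPreprocess (prompt : String) : List Char :=
  pvStripArticle (PySem.Chars.strip (PySem.Chars.lower prompt.toList))

-- A's `for word, qualifier_type in sorted(...)` loop with its early return
def pvLoopA : List (List Char × String) → List Char → String → Option String × String
  | [], _, prompt => (none, prompt)
  | (word, qualifier_type) :: rest, stripped, prompt =>
    if PySem.Chars.startswith stripped (word ++ [' ']) || stripped == word then
      (some qualifier_type,
       String.ofList (PySem.Chars.strip (PySem.List.slice stripped (some (word.length : Int)) none)))
    else pvLoopA rest stripped prompt

def parse_spatial_qualifier (prompt : String) : Option String × String :=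
  pvLoopA (PySem.List.sorted SPATIAL_QUALIFIERS.items (fun x => (x.1.length : Int)) true)
    (pvPreprocess prompt) prompt

-- ===== PORT B =====
-- Source B's module constant QUALIFIER_PHRASES: the table kept grouped by type
def QUALIFIER_PHRASES : List (String × List (List Char)) := [
  ("depth_min", ["nearest".toList, "closest".toList, "close".toList]),
  ("depth_max", ["farthest".toList, "far".toList, "distant".toList]),
  ("depth_2nd_min", ["second nearest".toList, "second closest".toList]),
  ("depth_2nd_max", ["second farthest".toList]),
  ("x_min", ["leftmost".toList, "left".toList]),
  ("x_max", ["rightmost".toList, "right".toList]),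
  ("x_2nd_min", ["second leftmost".toList, "second from left".toList]),
  ("x_2nd_max", ["second rightmost".toList, "second from right".toList]),
  ("y_min", ["topmost".toList, "top".toList, "upper".toList]),
  ("y_max", ["bottommost".toList, "bottom".toList, "lower".toList]),
  ("y_2nd_min", ["second topmost".toList, "second from top".toList]),
  ("y_2nd_max", ["second bottommost".toList, "second from bottom".toList]),
  ("middle", ["middle".toList, "central".toList, "center".toList]),
  ("depth_mid", ["mid-depth".toList, "middle depth".toList]),
  ("size_max", ["largest".toList, "biggest".toList, "big".toList]),
  ("size_min", ["smallest".toList, "small".toList, "tiny".toList])]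

-- PHRASE_TO_TYPE = {p: t for t, ps in QUALIFIER_PHRASES for p in ps}
def PHRASE_TO_TYPE : PySem.Dict (List Char) String :=
  PySem.Dict.ofList (QUALIFIER_PHRASES.flatMap (fun tp => tp.2.map (fun p => (p, tp.1))))

-- article = next((a for a in ('the ', 'a ', 'an ') if stripped.startswith(a)), '')
def pvArticle (s : List Char) : List Char :=
  (["the ".toList, "a ".toList, "an ".toList].find?
    (fun a => PySem.Chars.startswith s a)).getD []

-- one iteration of Source B's `for pos in range(len(stripped) + 1)` loop; the state is (qt, cut)
-- ('stripped[pos]' only runs when pos < len, where pyGet? returns 'some'; at pos = len the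
-- first disjunct short-circuits exactly as Python's `or` does)
def pvScan (stripped : List Char) (st : Option String × Int) (pos : Int) : Option String × Int :=
  if pos == PySem.List.len stripped || PySem.List.pyGet? stripped pos == some ' ' then
    match PHRASE_TO_TYPE.get? (PySem.List.slice stripped none (some pos)) with
    | some hit => (some hit, pos)
    | none => st
  else st

-- stripped = stripped[len(article):]
def pvDropArticle (s0 : List Char) : List Char :=
  PySem.List.slice s0 (some ((pvArticle s0).length : Int)) none

-- Source B's final `if qt is None … return`, from the loop's state r = (qt, cut)
def pvFinishB (prompt : String) (stripped : List Char) (r : Option String × Int) : Option String × String :=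
  match r with
  | (none, _) => (none, prompt)
  | (some qt, cut) => (some qt, String.ofList (PySem.Chars.strip (PySem.List.slice stripped (some cut) none)))

-- run Source B's `for pos in range(len(stripped) + 1)` loop, then finish
def pvRunB (prompt : String) (stripped : List Char) : Option String × String :=
  pvFinishB prompt stripped
    ((PySem.List.pyRange 0 (PySem.List.len stripped + 1) 1).foldl (pvScan stripped) (none, 0))

def parse_spatial_qualifier_alt (prompt : String) : Option String × String :=
  pvRunB prompt (pvDropArticle (PySem.Chars.strip (PySem.Chars.lower prompt.toList)))

-- ===== PRECONDITION & SPEC =====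
def Spec_parse_spatial_qualifier (prompt : String) (out : Option String × String) : Prop := out = parse_spatial_qualifier_alt prompt
instance (prompt : String) (out : Option String × String) : Decidable (Spec_parse_spatial_qualifier prompt out) := by unfold Spec_parse_spatial_qualifier; infer_instance

-- ===== CLAIM (what is proved, stated in full; the proofs are below) =====
def Claim_equal_parse_spatial_qualifier : Prop := ∀ (prompt : String), Dom_parse_spatial_qualifier prompt → Spec_parse_spatial_qualifier prompt (parse_spatial_qualifier prompt)

-- ===== LEMMAS AND PROOFS =====

-- the two module tables agree as dicts
set_option maxRecDepth 40000 in
lemma pvDict_eq : PHRASE_TO_TYPE = SPATIAL_QUALIFIERS := by decide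

-- both versions compute the same article-stripped prompt
lemma pvStripped_eq (s0 : List Char) : pvDropArticle s0 = pvStripArticle s0 := by
  unfold pvDropArticle pvArticle pvStripArticle
  rw [PySem.List.slice_from_natCast,
      PySem.List.slice_from s0 (by omega : (0:Int) ≤ 4),
      PySem.List.slice_from s0 (by omega : (0:Int) ≤ 2),
      PySem.List.slice_from s0 (by omega : (0:Int) ≤ 3)]
  by_cases h1 : PySem.Chars.startswith s0 ['t','h','e',' '] = true
  · simp [List.find?, h1]
  · rw [Bool.not_eq_true] at h1
    by_cases h2 : PySem.Chars.startswith s0 ['a',' '] = true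
    · simp [List.find?, h1, h2]
    · rw [Bool.not_eq_true] at h2
      by_cases h3 : PySem.Chars.startswith s0 ['a','n',' '] = true
      · simp [List.find?, h1, h2, h3]
      · rw [Bool.not_eq_true] at h3
        simp [List.find?, h1, h2, h3]

-- A's match condition for one table entry
def pvMatch (s w : List Char) : Bool :=
  PySem.Chars.startswith s (w ++ [' ']) || s == w

-- what B's scan sees at boundary c: the dict value of the prefix, if c is a boundary
def pvHit (s : List Char) (c : Nat) : Option String :=
  if c = s.length ∨ s[c]? = some ' ' then SPATIAL_QUALIFIERS.get? (s.take c) else none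

-- a match pins the word down as a prefix of s ending at the string's end or at a space
lemma pvMatch_shape (s w : List Char) (h : pvMatch s w = true) :
    s.take w.length = w ∧ (w.length = s.length ∨ s[w.length]? = some ' ') := by
  unfold pvMatch at h
  rcases Bool.or_eq_true_iff.mp h with h | h
  · obtain ⟨r, hr⟩ := (PySem.Chars.startswith_iff s (w ++ [' '])).mp h
    have hs : s = w ++ ' ' :: r := by simpa using hr.symm
    subst hs
    constructor
    · simp
    · right
      rw [List.getElem?_append_right (le_refl w.length)]
      simp
  · have hs : s = w := by simpa using h
    subst hs
    simp

lemma pvMatch_of_cut (s : List Char) (c : Nat) (hle : c ≤ s.length)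
    (h : c = s.length ∨ s[c]? = some ' ') : pvMatch s (s.take c) = true := by
  unfold pvMatch
  rcases h with h | h
  · subst h; simp
  · apply Bool.or_eq_true_iff.mpr; left
    rw [PySem.Chars.startswith_iff]
    have hc : c < s.length := (List.getElem?_eq_some_iff.mp h).1
    refine ⟨s.drop (c + 1), ?_⟩
    have : s.take c ++ [' '] ++ s.drop (c + 1) = s := by
      have h1 : s.take c ++ s.drop c = s := List.take_append_drop c s
      have h2 : s.drop c = ' ' :: s.drop (c + 1) := by
        rw [List.drop_eq_getElem_cons hc]
        congr 1
        exact (List.getElem?_eq_some_iff.mp h).2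
      rw [List.append_assoc]
      simpa [h2] using h1
    simpa using this

lemma pvMatch_word_eq (s w : List Char) (h : pvMatch s w = true) :
    w = s.take w.length := ((pvMatch_shape s w h).1).symm

lemma pvKeys_nodup : (pvQualPairs.map Prod.fst).Nodup := by decide

-- lookup facts about the qualifier table
lemma pvGet?_some_mem (c : List Char) (t : String)
    (h : SPATIAL_QUALIFIERS.get? c = some t) : (c, t) ∈ pvQualPairs :=
  (PySem.Dict.get?_eq_some_iff_mem_items SPATIAL_QUALIFIERS c t pvKeys_nodup).mp h

lemma pvMem_get?_some (c : List Char) (t : String)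
    (h : (c, t) ∈ pvQualPairs) : SPATIAL_QUALIFIERS.get? c = some t :=
  PySem.Dict.get?_of_mem_items SPATIAL_QUALIFIERS h pvKeys_nodup

-- every match of a table entry shows up as a boundary hit of B's scan
lemma pvMatch_hit (s w : List Char) (t : String) (hmem : (w, t) ∈ pvQualPairs)
    (hm : pvMatch s w = true) : pvHit s w.length = some t ∧ w.length ≤ s.length := by
  obtain ⟨htake, hbd⟩ := pvMatch_shape s w hm
  have hle : w.length ≤ s.length := by
    rcases hbd with h | h
    · omega
    · exact le_of_lt (List.getElem?_eq_some_iff.mp h).1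
  refine ⟨?_, hle⟩
  unfold pvHit
  rw [if_pos hbd, htake]
  exact pvMem_get?_some w t hmem

-- first-match characterisation of A's loop
lemma pvLoopA_none (L : List (List Char × String)) (s : List Char) (p : String)
    (h : ∀ q ∈ L, pvMatch s q.1 = false) : pvLoopA L s p = (none, p) := by
  induction L with
  | nil => simp [pvLoopA]
  | cons q rest ih =>
    obtain ⟨w, t⟩ := q
    have hq := h (w, t) List.mem_cons_self
    unfold pvMatch at hq
    simp only [pvLoopA]
    rw [if_neg (by simp_all)]
    exact ih (fun q hq' => h q (List.mem_cons_of_mem _ hq'))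

lemma pvLoopA_found (L : List (List Char × String)) (s : List Char) (p : String)
    (hpw : L.Pairwise (fun a b => (b.1.length : Int) ≤ (a.1.length : Int)))
    (hnd : (L.map Prod.fst).Nodup)
    (w : List Char) (t : String) (hmem : (w, t) ∈ L) (hm : pvMatch s w = true)
    (hmax : ∀ q ∈ L, pvMatch s q.1 = true → q.1.length ≤ w.length) :
    pvLoopA L s p
      = (some t, String.ofList (PySem.Chars.strip (PySem.List.slice s (some (w.length : Int)) none))) := by
  induction L with
  | nil => cases hmem
  | cons q rest ih =>
    obtain ⟨w', t'⟩ := q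
    by_cases hq : pvMatch s w' = true
    · -- the head matches: it must be exactly (w, t)
      have hww' : w' = w := by
        have hle : w'.length ≤ w.length := hmax (w', t') List.mem_cons_self hq
        have hge : w.length ≤ w'.length := by
          rcases List.mem_cons.mp hmem with heq | htail
          · have : w = w' := congrArg Prod.fst heq
            exact this ▸ le_refl _
          · exact_mod_cast (List.pairwise_cons.mp hpw).1 (w, t) htail
        have hlen : w'.length = w.length := le_antisymm hle hge
        rw [pvMatch_word_eq s w' hq, pvMatch_word_eq s w hm, hlen]
      have ht : t' = t := by
        rcases List.mem_cons.mp hmem with heq | htail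
        · exact (congrArg Prod.snd heq).symm
        · exfalso
          have hin : w ∈ rest.map Prod.fst := List.mem_map_of_mem htail
          rw [List.map_cons] at hnd
          exact (List.nodup_cons.mp hnd).1 (hww' ▸ hin)
      unfold pvMatch at hq
      simp only [pvLoopA]
      rw [if_pos (by simpa using hq), hww', ht]
    · have hwne : (w, t) ≠ (w', t') := fun h => hq (by
        have : w = w' := congrArg Prod.fst h
        exact this ▸ hm)
      have htail : (w, t) ∈ rest := by
        rcases List.mem_cons.mp hmem with heq | htail2
        · exact absurd heq hwne
        · exact htail2
      unfold pvMatch at hq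
      simp only [pvLoopA]
      rw [if_neg (by simpa using hq)]
      exact ih (List.pairwise_cons.mp hpw).2 (by rw [List.map_cons] at hnd; exact hnd.of_cons)
        htail (fun q hq' hmq => hmax q (List.mem_cons_of_mem _ hq') hmq)

-- one step of B's scan, at a natural position, in terms of pvHit
lemma pvScan_natCast (s : List Char) (st : Option String × Int) (k : Nat) :
    pvScan s st (k : Int)
      = match pvHit s k with
        | some t => (some t, (k : Int))
        | none => st := by
  unfold pvScan pvHit
  rw [pvDict_eq]
  by_cases h : k = s.length ∨ s[k]? = some ' '
  · rw [if_pos (by simpa using h), if_pos h, PySem.List.slice_to_natCast]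
  · rw [if_neg (by simpa using h), if_neg h]

-- the invariant of B's fold: the state is the last boundary hit so far
lemma pvFold_spec (s : List Char) (k : Nat) :
    ((PySem.List.pyRange 0 (k : Int) 1).foldl (pvScan s) (none, 0) = ((none : Option String), (0 : Int))
        ∧ ∀ c < k, pvHit s c = none)
    ∨ (∃ c < k, ∃ t, pvHit s c = some t
        ∧ (PySem.List.pyRange 0 (k : Int) 1).foldl (pvScan s) (none, 0) = (some t, (c : Int))
        ∧ ∀ c', c < c' → c' < k → pvHit s c' = none) := by
  induction k with
  | zero =>
    left
    constructor
    · rw [PySem.List.pyRange_one_eq_nil (by omega)]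
      rfl
    · omega
  | succ k ih =>
    have hsplit : PySem.List.pyRange 0 ((k + 1 : Nat) : Int) 1
        = PySem.List.pyRange 0 (k : Int) 1 ++ [(k : Int)] := by
      have : ((k + 1 : Nat) : Int) = (k : Int) + 1 := by push_cast; ring
      rw [this, PySem.List.pyRange_one_succ_right (by omega)]
    rw [hsplit, List.foldl_append]
    simp only [List.foldl_cons, List.foldl_nil]
    rcases ih with ⟨hacc, hnone⟩ | ⟨c, hck, t, hhit, hacc, hafter⟩
    · rw [hacc, pvScan_natCast]
      cases hh : pvHit s k with
      | none =>
        left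
        refine ⟨rfl, fun c hc => ?_⟩
        rcases Nat.lt_succ_iff_lt_or_eq.mp hc with h | h
        · exact hnone c h
        · exact h ▸ hh
      | some t =>
        right
        exact ⟨k, Nat.lt_succ_self k, t, hh, rfl, by omega⟩
    · rw [hacc, pvScan_natCast]
      cases hh : pvHit s k with
      | none =>
        right
        refine ⟨c, by omega, t, hhit, rfl, fun c' h1 h2 => ?_⟩
        rcases Nat.lt_succ_iff_lt_or_eq.mp h2 with h | h
        · exact hafter c' h1 h
        · exact h ▸ hh
      | some t' =>
        right
        exact ⟨k, Nat.lt_succ_self k, t', hh, rfl, by omega⟩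

-- sortedness facts about A's table scan
lemma pvSorted_pairwise :
    (PySem.List.sorted pvQualPairs (fun x => (x.1.length : Int)) true).Pairwise
      (fun a b => ((b.1.length : Int)) ≤ ((a.1.length : Int))) :=
  PySem.List.sorted_pairwise_rev pvQualPairs (fun x => (x.1.length : Int))

lemma pvSorted_nodup :
    ((PySem.List.sorted pvQualPairs (fun x => (x.1.length : Int)) true).map Prod.fst).Nodup := by
  have hperm := (PySem.List.sorted_perm pvQualPairs (fun x => (x.1.length : Int)) true).map Prod.fst
  exact hperm.nodup_iff.mpr pvKeys_nodup

-- ===== VERDICT (by name: the statement is the Claim_ definition above) =====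
theorem parse_spatial_qualifier_spec : Claim_equal_parse_spatial_qualifier := by
  intro prompt _
  unfold Spec_parse_spatial_qualifier parse_spatial_qualifier parse_spatial_qualifier_alt pvRunB pvPreprocess
  rw [pvStripped_eq]
  set s := pvStripArticle (PySem.Chars.strip (PySem.Chars.lower prompt.toList)) with hs
  have hitems : SPATIAL_QUALIFIERS.items = pvQualPairs := rfl
  rw [hitems]
  have hlen : PySem.List.len s + 1 = ((s.length + 1 : Nat) : Int) := by
    rw [PySem.List.len_eq]; push_cast; ring
  rw [hlen]
  rcases pvFold_spec s (s.length + 1) with ⟨hacc, hnone⟩ | ⟨c, hck, t, hhit, hacc, hafter⟩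
  · -- no boundary hit: no table entry matches, both return (none, prompt)
    rw [hacc]
    show pvLoopA _ s prompt = pvFinishB prompt s (none, 0)
    unfold pvFinishB
    apply pvLoopA_none
    intro q hq
    by_contra hmq
    have hm : pvMatch s q.1 = true := Bool.not_eq_false _ ▸ hmq
    obtain ⟨hhit, hle⟩ := pvMatch_hit s q.1 q.2 ((PySem.List.mem_sorted _ _ _ _).mp hq) hm
    have := hnone q.1.length (by omega)
    rw [this] at hhit
    cases hhit
  · -- the last boundary hit c names the unique longest matching table entry
    rw [hacc]
    have hbd : c = s.length ∨ s[c]? = some ' ' := by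
      by_contra hb
      unfold pvHit at hhit
      rw [if_neg hb] at hhit
      cases hhit
    have hcle : c ≤ s.length := by
      rcases hbd with h | h
      · omega
      · exact le_of_lt (List.getElem?_eq_some_iff.mp h).1
    have hget : SPATIAL_QUALIFIERS.get? (s.take c) = some t := by
      unfold pvHit at hhit
      rwa [if_pos hbd] at hhit
    have hmem : (s.take c, t) ∈ pvQualPairs := pvGet?_some_mem _ _ hget
    have hm : pvMatch s (s.take c) = true := pvMatch_of_cut s c hcle hbd
    have htlen : (s.take c).length = c := by simp [hcle]
    rw [pvLoopA_found _ s prompt pvSorted_pairwise pvSorted_nodup (s.take c) t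
      ((PySem.List.mem_sorted _ _ _ _).mpr hmem) hm ?_]
    · unfold pvFinishB
      rw [htlen]
    · intro q hq hmq
      obtain ⟨hhit', hle'⟩ := pvMatch_hit s q.1 q.2 ((PySem.List.mem_sorted _ _ _ _).mp hq) hmq
      rw [htlen]
      by_contra hgt
      have := hafter q.1.length (by omega) (by omega)
      rw [this] at hhit'
      cases hhit'
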